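-- pv_equiv track=rewrite | github.com/OncDocCoder/projects | cards06022020.py | check_for_pairsplus
-- ===== SOURCE A (Python) =====
-- def check_for_pairsplus(numbers):
--     a = 0
--     b= 0
--     c = 0
--     d = 0
--     e = 0
--     f = 0
--     g = 0
--     h = 0
--     i = 0
--     j = 0
--     k = 0
--     l = 0
--     m = 0
--     for x in numbers:
--         if x == 'A':
--             a += 1
--         if x == "2":
--             b += 1
--         if x == '3':
--             c += 1
--         if x == "4":
--             d += 1
--         if x == '5':
--             e += 1
--         if x == "6":
--             f += 1
--         if x == '7':
--             g += 1
--         if x == "8":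
--             h += 1
--         if x == '9':
--             i += 1
--         if x == "10":
--             j += 1
--         if x == 'J':
--             k += 1
--         if x == "Q":
--             l += 1
--         if x == 'K':
--             m += 1
--     numskull = []
--     numskull.extend((a, b, c, d, e, f, g, h, i, j, k, l, m) )
--     return numskull
-- ===== SOURCE B (Python) =====
-- RANKS = ['A', '2', '3', '4', '5', '6', '7', '8', '9', '10', 'J', 'Q', 'K']
--
-- def check_for_pairsplus(numbers):
--     # Staged decomposition: one independent counting scan per rank,
--     # instead of a single pass threading thirteen accumulators.
--     return [numbers.count(r) for r in RANKS]
-- ===== Notes on version B (the rewrite author's own statement) =====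
-- stated objective: simpler
-- what changed: Replaces A's single pass threading thirteen scalar accumulators through thirteen if-branches with a stateless staged decomposition: one independent list.count scan per rank, projected over the fixed rank list.
import Mathlib
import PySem

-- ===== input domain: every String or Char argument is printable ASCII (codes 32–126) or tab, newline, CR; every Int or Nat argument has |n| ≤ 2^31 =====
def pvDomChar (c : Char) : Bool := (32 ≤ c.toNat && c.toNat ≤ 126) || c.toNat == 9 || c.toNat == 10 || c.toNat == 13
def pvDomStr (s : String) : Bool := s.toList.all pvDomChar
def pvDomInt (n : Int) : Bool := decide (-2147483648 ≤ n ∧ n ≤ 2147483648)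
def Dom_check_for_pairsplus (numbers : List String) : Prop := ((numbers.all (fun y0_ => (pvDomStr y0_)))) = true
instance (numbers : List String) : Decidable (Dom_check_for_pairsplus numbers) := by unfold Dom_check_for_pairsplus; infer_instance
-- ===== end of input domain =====

-- ===== PORT A =====
-- B replaces A's single pass over thirteen threaded accumulators by thirteen independent per-rank scans (simpler).
-- A's loop state: the thirteen counters (a, b, c, d, e, f, g, h, i, j, k, l, m), each bumped by its own if.
def pvStepA (s : Int × Int × Int × Int × Int × Int × Int × Int × Int × Int × Int × Int × Int)
    (x : String) : Int × Int × Int × Int × Int × Int × Int × Int × Int × Int × Int × Int × Int :=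
  match s with
  | (a, b, c, d, e, f, g, h, i, j, k, l, m) =>
    ((if x = "A" then a + 1 else a),
     (if x = "2" then b + 1 else b),
     (if x = "3" then c + 1 else c),
     (if x = "4" then d + 1 else d),
     (if x = "5" then e + 1 else e),
     (if x = "6" then f + 1 else f),
     (if x = "7" then g + 1 else g),
     (if x = "8" then h + 1 else h),
     (if x = "9" then i + 1 else i),
     (if x = "10" then j + 1 else j),
     (if x = "J" then k + 1 else k),
     (if x = "Q" then l + 1 else l),
     (if x = "K" then m + 1 else m))

def check_for_pairsplus (numbers : List String) : List Int :=
  match numbers.foldl pvStepA (0, 0, 0, 0, 0, 0, 0, 0, 0, 0, 0, 0, 0) with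
  | (a, b, c, d, e, f, g, h, i, j, k, l, m) => [a, b, c, d, e, f, g, h, i, j, k, l, m]

-- ===== PORT B =====
def pvRanks : List String := ["A", "2", "3", "4", "5", "6", "7", "8", "9", "10", "J", "Q", "K"]

-- one independent list.count scan per rank (PySem.List.count = Python list.count)
def check_for_pairsplus_alt (numbers : List String) : List Int :=
  pvRanks.map (fun r => PySem.List.count numbers r)

-- ===== PRECONDITION & SPEC =====
def Spec_check_for_pairsplus (numbers : List String) (out : List Int) : Prop := out = check_for_pairsplus_alt numbers
instance (numbers : List String) (out : List Int) : Decidable (Spec_check_for_pairsplus numbers out) := by unfold Spec_check_for_pairsplus; infer_instance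

-- ===== CLAIM (what is proved, stated in full; the proofs are below) =====
def Claim_equal_check_for_pairsplus : Prop := ∀ (numbers : List String), Dom_check_for_pairsplus numbers → Spec_check_for_pairsplus numbers (check_for_pairsplus numbers)

-- ===== LEMMAS AND PROOFS =====

-- A's fold adds, to each starting counter, the number of occurrences of its rank.
set_option maxHeartbeats 2000000 in
theorem pvFoldA_eq (numbers : List String)
    (s : Int × Int × Int × Int × Int × Int × Int × Int × Int × Int × Int × Int × Int) :
    numbers.foldl pvStepA s =
      (s.1 + numbers.count "A", s.2.1 + numbers.count "2", s.2.2.1 + numbers.count "3",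
       s.2.2.2.1 + numbers.count "4", s.2.2.2.2.1 + numbers.count "5",
       s.2.2.2.2.2.1 + numbers.count "6", s.2.2.2.2.2.2.1 + numbers.count "7",
       s.2.2.2.2.2.2.2.1 + numbers.count "8", s.2.2.2.2.2.2.2.2.1 + numbers.count "9",
       s.2.2.2.2.2.2.2.2.2.1 + numbers.count "10", s.2.2.2.2.2.2.2.2.2.2.1 + numbers.count "J",
       s.2.2.2.2.2.2.2.2.2.2.2.1 + numbers.count "Q",
       s.2.2.2.2.2.2.2.2.2.2.2.2 + numbers.count "K") := by
  induction numbers generalizing s with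
  | nil => simp
  | cons x xs ih =>
    obtain ⟨a, b, c, d, e, f, g, h, i, j, k, l, m⟩ := s
    simp only [List.foldl_cons, pvStepA, ih, List.count_cons, Prod.mk.injEq]
    refine ⟨?_, ?_, ?_, ?_, ?_, ?_, ?_, ?_, ?_, ?_, ?_, ?_, ?_⟩ <;>
      split_ifs with h1 h2 <;> simp_all <;> omega

theorem pvAlt_eq (numbers : List String) :
    check_for_pairsplus_alt numbers =
      [(numbers.count "A" : Int), numbers.count "2", numbers.count "3", numbers.count "4",
       numbers.count "5", numbers.count "6", numbers.count "7", numbers.count "8",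
       numbers.count "9", numbers.count "10", numbers.count "J", numbers.count "Q",
       numbers.count "K"] := by
  simp [check_for_pairsplus_alt, pvRanks, PySem.List.count]

-- ===== VERDICT (by name: the statement is the Claim_ definition above) =====
theorem check_for_pairsplus_spec : Claim_equal_check_for_pairsplus := by
  intro numbers _
  unfold Spec_check_for_pairsplus check_for_pairsplus
  rw [pvFoldA_eq, pvAlt_eq]
  simp
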